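-- pv_equiv track=rewrite | github.com/FazalOne/Cambridge-A-Level-Computer-Science-P4-9608-9618-Solutions | A2 9608/9608 ON 2021 P42/9608 ON 2021 P42 Q5 Recursion.py | NonRecursive
-- ===== SOURCE A (Python) =====
-- def NonRecursive(Num1, Num2):
--     Value = 0 #INTEGER
--     while Num1 < Num2:
--         Value += Num1
--         Num1 *=  2
--     if Num1 > Num2:
--         Value += 10
--     else:
--         Value += Num1
--     return Value
-- ===== SOURCE B (Python) =====
-- def NonRecursive(Num1, Num2):
--     if Num1 >= Num2:
--         return 10 if Num1 > Num2 else Num1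
--     k = ((Num2 - 1) // Num1).bit_length()
--     final = Num1 * 2 ** k
--     return final - Num1 + (10 if final > Num2 else final)
-- ===== Notes on version B (the rewrite author's own statement) =====
-- stated objective: alternative
-- what changed: Replaced A's doubling while-loop and running accumulator by a closed form: the number of doublings is bit_length((Num2-1)//Num1), so the accumulated geometric sum is Num1*2**k - Num1, followed by the same +10 / +final branch.
import Mathlib
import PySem

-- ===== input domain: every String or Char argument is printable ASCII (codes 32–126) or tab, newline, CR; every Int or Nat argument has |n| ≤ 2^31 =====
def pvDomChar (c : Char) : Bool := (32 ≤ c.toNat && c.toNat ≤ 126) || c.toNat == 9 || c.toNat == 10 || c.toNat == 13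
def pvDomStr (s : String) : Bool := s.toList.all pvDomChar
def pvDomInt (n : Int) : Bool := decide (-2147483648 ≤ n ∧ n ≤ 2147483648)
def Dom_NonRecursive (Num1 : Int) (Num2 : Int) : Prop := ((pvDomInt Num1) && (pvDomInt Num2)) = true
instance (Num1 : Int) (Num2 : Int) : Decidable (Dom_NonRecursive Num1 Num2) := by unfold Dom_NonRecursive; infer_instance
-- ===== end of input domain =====

-- B replaces A's doubling while-loop by a closed form: the number of doublings is bit_length((Num2-1)//Num1), so the geometric sum is Num1*2^k - Num1 (alternative algorithm, same observable behaviour).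


-- ===== PORT A =====
-- A's while loop, made total by fuel: under Pre_ (Num1 ≥ 1 or Num1 ≥ Num2) the gap
-- Num2 - Num1 shrinks by at least 1 per iteration, so fuel (Num2 - Num1).toNat + 1 never runs out.
def pvLoopA : Nat → Int → Int → Int → Int
  | 0, Value, Num1, Num2 =>
      if Num1 > Num2 then Value + 10 else Value + Num1
  | fuel + 1, Value, Num1, Num2 =>
      if Num1 < Num2 then pvLoopA fuel (Value + Num1) (Num1 * 2) Num2
      else if Num1 > Num2 then Value + 10 else Value + Num1

def NonRecursive (Num1 : Int) (Num2 : Int) : Int :=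
  pvLoopA ((Num2 - Num1).toNat + 1) 0 Num1 Num2

-- ===== PORT B =====
-- closed form: k doublings with k = bit_length((Num2-1)//Num1); the accumulated sum is Num1*2^k - Num1
def NonRecursive_alt (Num1 : Int) (Num2 : Int) : Int :=
  if Num1 ≥ Num2 then (if Num1 > Num2 then 10 else Num1)
  else
    let k := PySem.Int.bitLength (PySem.Int.floordiv (Num2 - 1) Num1)
    let final := Num1 * 2 ^ k
    final - Num1 + (if final > Num2 then 10 else final)

-- ===== PRECONDITION & SPEC =====
-- Pre_ excludes Num1 ≤ 0 < Num2: there A's loop never terminates (Num1 never grows), and for Num1 = 0 B's Python divides by zero.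
def Pre_NonRecursive (Num1 : Int) (Num2 : Int) : Prop := 0 < Num1 ∨ Num2 ≤ Num1
instance (Num1 : Int) (Num2 : Int) : Decidable (Pre_NonRecursive Num1 Num2) := by unfold Pre_NonRecursive; infer_instance
def pvWitness_NonRecursive : Int × Int := (3, 17)
def Spec_NonRecursive (Num1 : Int) (Num2 : Int) (out : Int) : Prop := out = NonRecursive_alt Num1 Num2
instance (Num1 : Int) (Num2 : Int) (out : Int) : Decidable (Spec_NonRecursive Num1 Num2 out) := by unfold Spec_NonRecursive; infer_instance

-- ===== CLAIM (what is proved, stated in full; the proofs are below) =====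
def Claim_equal_NonRecursive : Prop := ∀ (Num1 : Int) (Num2 : Int), Dom_NonRecursive Num1 Num2 → Pre_NonRecursive Num1 Num2 → Spec_NonRecursive Num1 Num2 (NonRecursive Num1 Num2)

-- ===== LEMMAS AND PROOFS =====
-- k = bitLength ((b-1)//a) characterisation: b fits below a*2^j exactly when (b-1)//a fits below 2^j
theorem pv_char (a b : Int) (ha : 0 < a) (hab : a < b) (j : Nat) :
    b ≤ a * 2 ^ j ↔ (PySem.Int.floordiv (b - 1) a).natAbs < 2 ^ j := by
  rw [PySem.Int.floordiv_eq_ediv_of_pos ha]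
  have hnn : 0 ≤ (b - 1) / a := Int.ediv_nonneg (by omega) (by omega)
  have hdv : (b - 1) / a < (2 : Int) ^ j ↔ b - 1 < 2 ^ j * a := Int.ediv_lt_iff_lt_mul ha
  have hcast : ((2 ^ j : Nat) : Int) = (2 : Int) ^ j := by push_cast; ring
  have hcm : a * (2 : Int) ^ j = 2 ^ j * a := mul_comm _ _
  constructor
  · intro h
    have h2 : (b - 1) / a < (2 : Int) ^ j := hdv.mpr (by linarith)
    rw [← hcast] at h2
    omega
  · intro h
    have h2 : (b - 1) / a < (2 : Int) ^ j := by rw [← hcast]; omega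
    have := hdv.mp h2
    linarith

theorem pv_le_pow (a b : Int) (ha : 0 < a) (hab : a < b) :
    b ≤ a * 2 ^ PySem.Int.bitLength (PySem.Int.floordiv (b - 1) a) := by
  rw [pv_char a b ha hab]
  exact PySem.Int.lt_two_pow_bitLength _

theorem pv_min_pow (a b : Int) (ha : 0 < a) (hab : a < b) (j : Nat)
    (h : b ≤ a * 2 ^ j) : PySem.Int.bitLength (PySem.Int.floordiv (b - 1) a) ≤ j := by
  rw [pv_char a b ha hab] at h
  by_cases h0 : PySem.Int.floordiv (b - 1) a = 0
  · rw [h0, PySem.Int.bitLength_zero]; omega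
  · by_contra hlt
    have h1 := PySem.Int.two_pow_bitLength_le _ h0
    have h2 : (2 : Nat) ^ (PySem.Int.bitLength (PySem.Int.floordiv (b - 1) a) - 1) < 2 ^ j :=
      lt_of_le_of_lt h1 h
    have h3 := (Nat.pow_lt_pow_iff_right (by norm_num : 1 < 2)).mp h2
    omega

-- B's closed form satisfies the doubling recurrence A's loop performs
theorem pv_alt_step (a b : Int) (ha : 0 < a) (hab : a < b) :
    NonRecursive_alt a b = a + NonRecursive_alt (a * 2) b := by
  have hk1 := pv_le_pow a b ha hab
  set k := PySem.Int.bitLength (PySem.Int.floordiv (b - 1) a) with hkdef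
  have hkne : k ≠ 0 := by
    intro h0
    rw [h0, pow_zero, mul_one] at hk1
    omega
  by_cases h2 : a * 2 ≥ b
  · have hkle : k ≤ 1 := pv_min_pow a b ha hab 1 (by rw [pow_one]; exact h2)
    have hk : k = 1 := by omega
    simp only [NonRecursive_alt, if_neg (by omega : ¬ a ≥ b), if_pos h2, ← hkdef, hk]
    have e : a * 2 ^ 1 = a * 2 := by ring
    rw [e]
    split_ifs <;> ring
  · replace h2 : a * 2 < b := by omega
    have hk1' := pv_le_pow (a * 2) b (by omega) h2
    set k' := PySem.Int.bitLength (PySem.Int.floordiv (b - 1) (a * 2)) with hk'def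
    have hle : k ≤ k' + 1 := pv_min_pow a b ha hab (k' + 1) (by
      have e1 : a * 2 ^ (k' + 1) = a * 2 * 2 ^ k' := by ring
      rw [e1]; exact hk1')
    have hge : k' ≤ k - 1 := pv_min_pow (a * 2) b (by omega) h2 (k - 1) (by
      have e2 : a * 2 * 2 ^ (k - 1) = a * 2 ^ (k - 1 + 1) := by ring
      have e3 : k - 1 + 1 = k := by omega
      rw [e2, e3]; exact hk1)
    have hk : k = k' + 1 := by omega
    simp only [NonRecursive_alt, if_neg (by omega : ¬ a ≥ b), if_neg (by omega : ¬ a * 2 ≥ b),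
      ← hkdef, ← hk'def, hk]
    have e4 : a * 2 * 2 ^ k' = a * 2 ^ (k' + 1) := by ring
    rw [e4]
    split_ifs <;> ring

theorem pv_loop_eq (fuel : Nat) : ∀ (v a b : Int), 0 < a → (b - a).toNat ≤ fuel →
    pvLoopA fuel v a b = v + NonRecursive_alt a b := by
  induction fuel with
  | zero =>
      intro v a b ha hf
      have hba : b ≤ a := by omega
      simp only [pvLoopA, NonRecursive_alt, if_pos (by omega : a ≥ b)]
      split_ifs <;> ring
  | succ f ih =>
      intro v a b ha hf
      simp only [pvLoopA]
      by_cases h : a < b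
      · rw [if_pos h, ih (v + a) (a * 2) b (by omega) (by omega), pv_alt_step a b ha h]
        ring
      · rw [if_neg h]
        simp only [NonRecursive_alt, if_pos (by omega : a ≥ b)]
        split_ifs <;> ring

-- ===== VERDICT (by name: the statement is the Claim_ definition above) =====
theorem NonRecursive_spec : Claim_equal_NonRecursive := by
  intro n1 n2 _ hpre
  unfold Spec_NonRecursive NonRecursive
  rcases hpre with h1 | h2
  · rw [pv_loop_eq _ 0 n1 n2 h1 (by omega)]; ring
  · have hf : (n2 - n1).toNat + 1 = 0 + 1 := by omega
    rw [hf]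
    simp only [pvLoopA, if_neg (by omega : ¬ n1 < n2)]
    simp only [NonRecursive_alt, if_pos (by omega : n1 ≥ n2)]
    split_ifs <;> ring
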